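-- pv_equiv track=rewrite | github.com/kelseaconrad19/Lesson5Assignment | 3GradeAnalyzer.py | categorize_grades
-- ===== SOURCE A (Python) =====
-- def categorize_grades(grade_list):
--     categorized_grades = []
--     for x in grade_list:
--         if 90 <= x <= 100:
--             grade = "A"
--         elif 80 <= x <= 89:
--             grade = "B"
--         elif 70 <= x <= 79:
--             grade = "C"
--         elif 60 <= x <= 69:
--             grade = "D"
--         else:
--             grade = "F"
--         categorized_grades.append(grade)
--     categorized_grades.sort()
--     return categorized_grades
-- ===== SOURCE B (Python) =====
-- def categorize_grades(grade_list):
--     a = b = c = d = f = 0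
--     for x in grade_list:
--         if 90 <= x <= 100:
--             a += 1
--         elif 80 <= x <= 89:
--             b += 1
--         elif 70 <= x <= 79:
--             c += 1
--         elif 60 <= x <= 69:
--             d += 1
--         else:
--             f += 1
--     return ["A"] * a + ["B"] * b + ["C"] * c + ["D"] * d + ["F"] * f
-- ===== Notes on version B (the rewrite author's own statement) =====
-- stated objective: alternative
-- what changed: Replaces map-to-letters-then-sort with a one-pass counting sort: tally the five letter categories and emit the letters in alphabetical order by replication; same wall-clock in CPython since the per-element loop dominates.
import Mathlib
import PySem

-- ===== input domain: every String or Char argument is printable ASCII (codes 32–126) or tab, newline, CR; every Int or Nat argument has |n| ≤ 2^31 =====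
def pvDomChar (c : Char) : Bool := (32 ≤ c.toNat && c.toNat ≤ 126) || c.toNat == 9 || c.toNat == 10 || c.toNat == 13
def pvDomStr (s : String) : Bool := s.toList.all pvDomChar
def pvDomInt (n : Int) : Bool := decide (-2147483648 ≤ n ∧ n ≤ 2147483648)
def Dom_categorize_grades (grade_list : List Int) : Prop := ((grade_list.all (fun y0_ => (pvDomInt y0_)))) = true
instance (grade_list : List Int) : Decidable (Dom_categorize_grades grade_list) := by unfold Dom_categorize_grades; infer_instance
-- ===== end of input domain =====

-- B replaces A's map-to-letters-then-sort with a one-pass counting sort over the five letter categories (objective: alternative).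


-- ===== PORT A =====
-- the if/elif chain assigning the letter grade
def pvLetter (x : Int) : String :=
  if 90 ≤ x ∧ x ≤ 100 then "A"
  else if 80 ≤ x ∧ x ≤ 89 then "B"
  else if 70 ≤ x ∧ x ≤ 79 then "C"
  else if 60 ≤ x ∧ x ≤ 69 then "D"
  else "F"

def categorize_grades (grade_list : List Int) : List String :=
  let categorized_grades := grade_list.foldl (fun acc x => acc ++ [pvLetter x]) []
  PySem.List.sorted categorized_grades (fun s => s) false

-- ===== PORT B =====
-- one counter per category, incremented by the same if/elif chain
def pvStep (c : Nat × Nat × Nat × Nat × Nat) (x : Int) : Nat × Nat × Nat × Nat × Nat :=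
  if 90 ≤ x ∧ x ≤ 100 then (c.1 + 1, c.2.1, c.2.2.1, c.2.2.2.1, c.2.2.2.2)
  else if 80 ≤ x ∧ x ≤ 89 then (c.1, c.2.1 + 1, c.2.2.1, c.2.2.2.1, c.2.2.2.2)
  else if 70 ≤ x ∧ x ≤ 79 then (c.1, c.2.1, c.2.2.1 + 1, c.2.2.2.1, c.2.2.2.2)
  else if 60 ≤ x ∧ x ≤ 69 then (c.1, c.2.1, c.2.2.1, c.2.2.2.1 + 1, c.2.2.2.2)
  else (c.1, c.2.1, c.2.2.1, c.2.2.2.1, c.2.2.2.2 + 1)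

def pvBuild (c : Nat × Nat × Nat × Nat × Nat) : List String :=
  List.replicate c.1 "A" ++ (List.replicate c.2.1 "B" ++ (List.replicate c.2.2.1 "C"
    ++ (List.replicate c.2.2.2.1 "D" ++ List.replicate c.2.2.2.2 "F")))

def categorize_grades_alt (grade_list : List Int) : List String :=
  pvBuild (grade_list.foldl pvStep (0, 0, 0, 0, 0))

-- ===== PRECONDITION & SPEC =====
def Spec_categorize_grades (grade_list : List Int) (out : List String) : Prop := out = categorize_grades_alt grade_list
instance (grade_list : List Int) (out : List String) : Decidable (Spec_categorize_grades grade_list out) := by unfold Spec_categorize_grades; infer_instance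

-- ===== CLAIM (what is proved, stated in full; the proofs are below) =====
def Claim_equal_categorize_grades : Prop := ∀ (grade_list : List Int), Dom_categorize_grades grade_list → Spec_categorize_grades grade_list (categorize_grades grade_list)

-- ===== LEMMAS AND PROOFS =====

-- one step of the counting fold adds exactly the letter of x to the built list, up to permutation
theorem pvBuild_step (c : Nat × Nat × Nat × Nat × Nat) (x : Int) :
    (pvBuild (pvStep c x)).Perm (pvLetter x :: pvBuild c) := by
  obtain ⟨a, b, cc, d, f⟩ := c
  unfold pvStep pvLetter pvBuild
  split_ifs <;> simp only [List.replicate_succ]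
  · exact List.Perm.refl _
  · exact List.perm_middle
  · simpa [List.append_assoc] using
      (List.perm_middle (a := "C") (l₁ := List.replicate a "A" ++ List.replicate b "B")
        (l₂ := List.replicate cc "C" ++ (List.replicate d "D" ++ List.replicate f "F")))
  · simpa [List.append_assoc] using
      (List.perm_middle (a := "D") (l₁ := List.replicate a "A" ++ (List.replicate b "B" ++ List.replicate cc "C"))
        (l₂ := List.replicate d "D" ++ List.replicate f "F"))
  · simpa [List.append_assoc] using
      (List.perm_middle (a := "F") (l₁ := List.replicate a "A" ++ (List.replicate b "B" ++ (List.replicate cc "C" ++ List.replicate d "D")))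
        (l₂ := List.replicate f "F"))

-- the counting fold builds a permutation of the mapped letters
theorem pvBuild_foldl (grade_list : List Int) (c : Nat × Nat × Nat × Nat × Nat) :
    (pvBuild (grade_list.foldl pvStep c)).Perm (grade_list.map pvLetter ++ pvBuild c) := by
  induction grade_list generalizing c with
  | nil => simp
  | cons x t ih =>
      simp only [List.foldl_cons, List.map_cons, List.cons_append]
      exact (ih (pvStep c x)).trans
        ((List.Perm.append_left _ (pvBuild_step c x)).trans List.perm_middle)

-- the built list is sorted (A ≤ B ≤ C ≤ D ≤ F)
theorem pvBuild_pairwise (c : Nat × Nat × Nat × Nat × Nat) :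
    (pvBuild c).Pairwise (· ≤ ·) := by
  obtain ⟨a, b, cc, d, f⟩ := c
  unfold pvBuild
  have hr : ∀ (n : Nat) (t : String), (List.replicate n t).Pairwise (fun a b => a ≤ b) :=
    fun n t => List.pairwise_replicate.2 (Or.inr le_rfl)
  refine List.pairwise_append.2 ⟨hr _ _, ?_, ?_⟩
  · refine List.pairwise_append.2 ⟨hr _ _, ?_, ?_⟩
    · refine List.pairwise_append.2 ⟨hr _ _, ?_, ?_⟩
      · refine List.pairwise_append.2 ⟨hr _ _, hr _ _, ?_⟩
        intro u hu v hv
        rw [List.eq_of_mem_replicate hu, List.eq_of_mem_replicate hv, String.le_iff_toList_le]; decide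
      · intro u hu v hv
        rw [List.eq_of_mem_replicate hu]
        rcases List.mem_append.1 hv with h | h <;>
          rw [List.eq_of_mem_replicate h, String.le_iff_toList_le] <;> decide
    · intro u hu v hv
      rw [List.eq_of_mem_replicate hu]
      rcases List.mem_append.1 hv with h | h
      · rw [List.eq_of_mem_replicate h, String.le_iff_toList_le]; decide
      · rcases List.mem_append.1 h with h2 | h2 <;>
          rw [List.eq_of_mem_replicate h2, String.le_iff_toList_le] <;> decide
  · intro u hu v hv
    rw [List.eq_of_mem_replicate hu]
    rcases List.mem_append.1 hv with h | h
    · rw [List.eq_of_mem_replicate h, String.le_iff_toList_le]; decide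
    · rcases List.mem_append.1 h with h2 | h2
      · rw [List.eq_of_mem_replicate h2, String.le_iff_toList_le]; decide
      · rcases List.mem_append.1 h2 with h3 | h3 <;>
          rw [List.eq_of_mem_replicate h3, String.le_iff_toList_le] <;> decide

-- ===== VERDICT (by name: the statement is the Claim_ definition above) =====
theorem categorize_grades_spec : Claim_equal_categorize_grades := by
  intro grade_list _
  unfold Spec_categorize_grades categorize_grades categorize_grades_alt
  rw [PySem.List.foldl_append_singleton_eq_map]
  have hperm : (PySem.List.sorted (grade_list.map pvLetter) (fun s => s) false).Perm
      (pvBuild (grade_list.foldl pvStep (0, 0, 0, 0, 0))) := by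
    refine (PySem.List.sorted_perm _ _ _).trans ?_
    refine ((pvBuild_foldl grade_list (0, 0, 0, 0, 0)).trans ?_).symm
    simp [pvBuild]
  exact PySem.List.eq_of_perm_of_pairwise_le_of_injective (fun s : String => s)
    (fun _ _ h => h) hperm (PySem.List.sorted_pairwise _ _) (pvBuild_pairwise _)
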